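-- pv_equiv track=rewrite | github.com/PeterZZQ/CeSpGRN | simulator/boolODE/parsing_fnc.py | getRegulatorsInRule
-- ===== SOURCE A (Python) =====
-- def getRegulatorsInRule(rule, species, inputs):
--     rhs = rule
--     rhs = rhs.replace('(',' ')
--     rhs = rhs.replace(')',' ')
--     tokens = rhs.split(' ')
--
--     allreg = set([t for t in tokens if (t in species or t in inputs)])
--     regulatorySpecies = set([t for t in tokens if t in species])
--     inputreg = set([t for t in tokens if t in inputs])
--
--     return((allreg, regulatorySpecies, inputreg))
-- ===== SOURCE B (Python) =====
-- def getRegulatorsInRule(rule, species, inputs):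
--     # single character-level scan: tokenize on ' ', '(', ')' and classify each
--     # token on the fly; no replace() copies, no intermediate token list
--     allreg, regulatorySpecies, inputreg = set(), set(), set()
--
--     def classify(tok):
--         s = tok in species
--         i = tok in inputs
--         if s or i:
--             allreg.add(tok)
--         if s:
--             regulatorySpecies.add(tok)
--         if i:
--             inputreg.add(tok)
--
--     cur = []
--     for ch in rule:
--         if ch in ' ()':
--             classify(''.join(cur))
--             cur = []
--         else:
--             cur.append(ch)
--     classify(''.join(cur))
--     return (allreg, regulatorySpecies, inputreg)
-- ===== Notes on version B (the rewrite author's own statement) =====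
-- stated objective: alternative
-- what changed: Replaces A's two whole-string replace() copies + split + three membership-filtering comprehensions by a single character-level scan of the rule that tokenizes on ' ', '(' and ')' and classifies each token into the three sets on the fly (memberships tested once per token).
import Mathlib
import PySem

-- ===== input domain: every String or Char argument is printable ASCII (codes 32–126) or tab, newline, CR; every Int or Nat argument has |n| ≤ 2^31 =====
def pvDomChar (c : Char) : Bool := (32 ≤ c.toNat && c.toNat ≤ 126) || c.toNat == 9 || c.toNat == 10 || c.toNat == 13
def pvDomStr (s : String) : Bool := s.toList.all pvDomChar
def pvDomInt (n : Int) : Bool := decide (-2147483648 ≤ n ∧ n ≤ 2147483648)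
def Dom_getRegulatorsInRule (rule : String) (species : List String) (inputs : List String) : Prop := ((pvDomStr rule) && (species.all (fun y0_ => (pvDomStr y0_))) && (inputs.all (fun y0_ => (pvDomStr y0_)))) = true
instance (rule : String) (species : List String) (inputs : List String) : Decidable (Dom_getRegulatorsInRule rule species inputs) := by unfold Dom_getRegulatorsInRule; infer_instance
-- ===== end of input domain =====

-- B replaces A's replace/replace/split plus three list comprehensions by one character-level
-- scan of the rule that tokenizes on ' '/'('/')' and classifies each token on the fly
-- (objective: alternative — no intermediate copies/token list, same asymptotic cost).

-- ===== PORT A =====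
def getRegulatorsInRule (rule : String) (species : List String) (inputs : List String) : List String × List String × List String :=
  let rhs := rule
  let rhs := PySem.Str.replace rhs "(" " "
  let rhs := PySem.Str.replace rhs ")" " "
  let tokens := (PySem.Str.split? rhs " ").getD []   -- sep " " ≠ "", so split? is always some here
  let allreg := PySem.Set.ofList (tokens.filter (fun t => species.contains t || inputs.contains t))
  let regulatorySpecies := PySem.Set.ofList (tokens.filter (fun t => species.contains t))
  let inputreg := PySem.Set.ofList (tokens.filter (fun t => inputs.contains t))
  (allreg, regulatorySpecies, inputreg)

-- ===== PORT B =====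
-- Source B's classify(tok): test the two memberships once, add to the three sets
def pvClassify (species inputs : List String)
    (acc : PySem.Set String × PySem.Set String × PySem.Set String) (tok : String) :
    PySem.Set String × PySem.Set String × PySem.Set String :=
  let s := species.contains tok
  let i := inputs.contains tok
  (if s || i then PySem.Set.add acc.1 tok else acc.1,
   if s then PySem.Set.add acc.2.1 tok else acc.2.1,
   if i then PySem.Set.add acc.2.2 tok else acc.2.2)

-- Source B's 'ch in " ()"'
def pvDelim (c : Char) : Bool := c == ' ' || c == '(' || c == ')'

-- Source B's for-loop: scan the characters, flushing the current token at each delimiter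
def pvScan (species inputs : List String) :
    List Char → List Char → (PySem.Set String × PySem.Set String × PySem.Set String) →
    PySem.Set String × PySem.Set String × PySem.Set String
  | [], cur, acc => pvClassify species inputs acc (String.ofList cur)
  | c :: cs, cur, acc =>
      if pvDelim c then pvScan species inputs cs [] (pvClassify species inputs acc (String.ofList cur))
      else pvScan species inputs cs (cur ++ [c]) acc

def getRegulatorsInRule_alt (rule : String) (species : List String) (inputs : List String) : List String × List String × List String :=
  pvScan species inputs rule.toList [] (PySem.Set.empty, PySem.Set.empty, PySem.Set.empty)

-- ===== PRECONDITION & SPEC =====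
def Spec_getRegulatorsInRule (rule : String) (species : List String) (inputs : List String) (out : List String × List String × List String) : Prop := out = getRegulatorsInRule_alt rule species inputs
instance (rule : String) (species : List String) (inputs : List String) (out : List String × List String × List String) : Decidable (Spec_getRegulatorsInRule rule species inputs out) := by unfold Spec_getRegulatorsInRule; infer_instance

-- ===== CLAIM (what is proved, stated in full; the proofs are below) =====
def Claim_equal_getRegulatorsInRule : Prop := ∀ (rule : String) (species : List String) (inputs : List String), Dom_getRegulatorsInRule rule species inputs → Spec_getRegulatorsInRule rule species inputs (getRegulatorsInRule rule species inputs)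

-- ===== LEMMAS AND PROOFS =====

-- the token list B's scan walks through, as a function (proof artefact, used by no port)
def pvToks : List Char → List Char → List (List Char)
  | [], cur => [cur]
  | c :: cs, cur => if pvDelim c then cur :: pvToks cs [] else pvToks cs (cur ++ [c])

theorem scan_eq_foldl (species inputs : List String) :
    ∀ (cs cur : List Char) acc,
      pvScan species inputs cs cur acc
        = (pvToks cs cur).foldl (fun a t => pvClassify species inputs a (String.ofList t)) acc := by
  intro cs
  induction cs with
  | nil => intro cur acc; simp [pvScan, pvToks]
  | cons c cs ih =>
    intro cur acc
    by_cases h : pvDelim c = true <;> simp [pvScan, pvToks, h, ih]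

-- Chars.replace with one-char old/new is a map
theorem replace_go_single (a b : Char) :
    ∀ (fuel : Nat) (l acc : List Char), l.length ≤ fuel →
      PySem.Chars.replace.go [a] [b] fuel l acc
        = acc.reverse ++ l.map (fun c => if c == a then b else c) := by
  intro fuel
  induction fuel with
  | zero => intro l acc h; simp at h; simp [h, PySem.Chars.replace.go]
  | succ n ih =>
    intro l acc h
    cases l with
    | nil => simp [PySem.Chars.replace.go]
    | cons c t =>
      simp only [PySem.Chars.replace.go]
      by_cases hc : c = a
      · have : List.isPrefixOf [a] (c :: t) = true := by simp [List.isPrefixOf, hc]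
        rw [if_pos this]
        have hd1 : List.drop [a].length (c :: t) = t := rfl
        have hr1 : [b].reverse ++ acc = b :: acc := rfl
        rw [hd1, hr1, ih t (b :: acc) (by simp at h; omega)]
        simp [hc]
      · have : List.isPrefixOf [a] (c :: t) = false := by simp [List.isPrefixOf]; exact fun e => hc e.symm
        rw [if_neg (by simp [this])]
        rw [ih t (c :: acc) (by simp at h; omega)]
        simp [hc]

theorem replace_single (a b : Char) (cs : List Char) :
    PySem.Chars.replace cs [a] [b] = cs.map (fun c => if c == a then b else c) := by
  have h := replace_go_single a b cs.length cs [] (Nat.le_refl _)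
  simpa [PySem.Chars.replace] using h

-- Chars.splitOn with one-char sep, characterized by a token recursion (cur kept reversed, as in go)
def pvSplitCh (a : Char) : List Char → List Char → List (List Char)
  | [], cur => [cur.reverse]
  | c :: cs, cur => if c == a then cur.reverse :: pvSplitCh a cs [] else pvSplitCh a cs (c :: cur)

theorem splitOn_go_single (a : Char) :
    ∀ (fuel : Nat) (l cur : List Char) (acc : List (List Char)), l.length < fuel →
      PySem.Chars.splitOn.go [a] fuel l cur acc = acc.reverse ++ pvSplitCh a l cur := by
  intro fuel
  induction fuel with
  | zero => intro l cur acc h; omega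
  | succ n ih =>
    intro l cur acc h
    cases l with
    | nil => simp [PySem.Chars.splitOn.go, pvSplitCh]
    | cons c t =>
      simp only [PySem.Chars.splitOn.go]
      by_cases hc : c = a
      · have hp : List.isPrefixOf [a] (c :: t) = true := by simp [List.isPrefixOf, hc]
        rw [if_pos hp]
        have hd1 : List.drop [a].length (c :: t) = t := rfl
        rw [hd1, ih t [] (cur.reverse :: acc) (by simp at h ⊢; omega)]
        simp [pvSplitCh, hc]
      · have hp : List.isPrefixOf [a] (c :: t) = false := by simp [List.isPrefixOf]; exact fun e => hc e.symm
        rw [if_neg (by simp [hp])]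
        rw [ih t (c :: cur) acc (by simp at h ⊢; omega)]
        simp [pvSplitCh, hc]

theorem splitOn_single (a : Char) (cs : List Char) :
    PySem.Chars.splitOn cs [a] = pvSplitCh a cs [] := by
  have := splitOn_go_single a (cs.length + 1) cs [] [] (by omega)
  simpa [PySem.Chars.splitOn] using this

-- splitting the double-replaced string on ' ' = tokenizing the original on the three delimiters
theorem splitCh_map_eq_toks :
    ∀ (cs cur : List Char),
      pvSplitCh ' ' (cs.map (fun c => if c == '(' || c == ')' then ' ' else c)) cur
        = pvToks cs cur.reverse := by
  intro cs
  induction cs with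
  | nil => intro cur; simp [pvSplitCh, pvToks]
  | cons c t ih =>
    intro cur
    simp only [List.map_cons]
    by_cases hd : pvDelim c = true
    · have hd' : c = ' ' ∨ c = '(' ∨ c = ')' := by
        simpa [pvDelim, or_assoc] using hd
      have h1 : (if c == '(' || c == ')' then ' ' else c) = ' ' := by
        rcases hd' with h | h | h <;> simp [h]
      rw [h1]
      simp only [pvSplitCh, pvToks, hd, if_pos (by rfl : (' ' == ' ') = true)]
      rw [ih []]
      rfl
    · have hd' : ¬c = ' ' ∧ ¬c = '(' ∧ ¬c = ')' := by
        have h2 := hd; simp [pvDelim] at h2; exact ⟨h2.1.1, h2.1.2, h2.2⟩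
      have hne : (c == ' ') = false ∧ (c == '(') = false ∧ (c == ')') = false := by
        exact ⟨by simp [hd'.1], by simp [hd'.2.1], by simp [hd'.2.2]⟩
      have h1 : (if c == '(' || c == ')' then ' ' else c) = c := by simp [hne.2.1, hne.2.2]
      rw [h1]
      simp only [pvSplitCh, pvToks, hne.1, hd]
      rw [ih (c :: cur)]
      simp

-- the two single-char replaces compose into one map
theorem double_replace (cs : List Char) :
    PySem.Chars.replace (PySem.Chars.replace cs ['('] [' ']) [')'] [' ']
      = cs.map (fun c => if c == '(' || c == ')' then ' ' else c) := by
  rw [replace_single, replace_single, List.map_map]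
  apply List.map_congr_left
  intro c _
  by_cases h1 : c = '(' <;> by_cases h2 : c = ')' <;> simp [h1, h2, Function.comp]

-- A's token list = map ofList of pvToks
theorem tokens_eq (rule : String) :
    (PySem.Str.split? (PySem.Str.replace (PySem.Str.replace rule "(" " ") ")" " ") " ").getD []
      = (pvToks rule.toList []).map String.ofList := by
  have h : ∀ s : String, (PySem.Str.split? s " ").getD [] = (PySem.Chars.splitOn s.toList [' ']).map String.ofList := by
    intro s
    rfl
  rw [h]
  have hrep : (PySem.Str.replace (PySem.Str.replace rule "(" " ") ")" " ").toList
      = rule.toList.map (fun c => if c == '(' || c == ')' then ' ' else c) := by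
    have h1 : ∀ (t : String) (old new : String),
        (PySem.Str.replace t old new).toList = PySem.Chars.replace t.toList old.toList new.toList := by
      intro t old new
      simp [PySem.Str.replace]
    rw [h1, h1]
    have h2 : (String.toList "(") = ['('] := rfl
    have h3 : (String.toList ")") = [')'] := rfl
    have h4 : (String.toList " ") = [' '] := rfl
    rw [h2, h3, h4]
    exact double_replace rule.toList
  rw [hrep, splitOn_single, splitCh_map_eq_toks rule.toList []]
  rfl

-- folding pvClassify over any token list componentwise
theorem foldl_classify_components (species inputs : List String) :
    ∀ (ts : List String) (a r i : PySem.Set String),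
      ts.foldl (fun acc t => pvClassify species inputs acc t) (a, r, i)
        = (ts.foldl (fun s t => if species.contains t || inputs.contains t then PySem.Set.add s t else s) a,
           ts.foldl (fun s t => if species.contains t then PySem.Set.add s t else s) r,
           ts.foldl (fun s t => if inputs.contains t then PySem.Set.add s t else s) i) := by
  intro ts
  induction ts with
  | nil => intro a r i; rfl
  | cons t ts ih =>
    intro a r i
    simp only [List.foldl_cons]
    have hstep : pvClassify species inputs (a, r, i) t =
        (if species.contains t || inputs.contains t then PySem.Set.add a t else a,
         if species.contains t then PySem.Set.add r t else r,
         if inputs.contains t then PySem.Set.add i t else i) := rfl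
    rw [hstep, ih]

-- conditional Set.add fold = Set.ofList of the filter
theorem foldl_cond_add (p : String → Bool) :
    ∀ (ts : List String) (s : PySem.Set String),
      ts.foldl (fun s t => if p t then PySem.Set.add s t else s) s
        = (ts.filter p).foldl PySem.Set.add s := by
  intro ts
  induction ts with
  | nil => intro s; rfl
  | cons t ts ih =>
    intro s
    by_cases h : p t = true <;> simp [h, ih]

-- ===== VERDICT (by name: the statement is the Claim_ definition above) =====
theorem getRegulatorsInRule_spec : Claim_equal_getRegulatorsInRule := by
  intro rule species inputs _
  unfold Spec_getRegulatorsInRule getRegulatorsInRule getRegulatorsInRule_alt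
  simp only []
  rw [tokens_eq rule, scan_eq_foldl]
  rw [show
      (pvToks rule.toList []).foldl
        (fun a t => pvClassify species inputs a (String.ofList t))
        (PySem.Set.empty, PySem.Set.empty, PySem.Set.empty)
      = ((pvToks rule.toList []).map String.ofList).foldl
          (fun a t => pvClassify species inputs a t)
          (PySem.Set.empty, PySem.Set.empty, PySem.Set.empty)
    from (List.foldl_map).symm]
  rw [foldl_classify_components, foldl_cond_add, foldl_cond_add, foldl_cond_add]
  rfl
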